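-- pv_equiv track=rewrite | github.com/rikkarikka/Eq2Doc | new_eq2plan-3.8.py | dp_vocabize_2
-- ===== SOURCE A (Python) =====
-- def dp_vocabize_2(item, vocab):
--   vec = []
--   flat_item = []
--   for x in item:
--     new_sent = "NEW_S"
--     for y in x:
--       flat_item.append(y+[new_sent])
--       new_sent = "SAME_S"
--
--   for x in flat_item[:5]:
--     tvec = [vocab.index(y) if y in vocab else len(vocab) for y in x]
--     vec.append(tvec)
--
--   if len(vec)<5:
--     vec = vec + [[0]*10 for i in range(5-len(vec))]
--
--   vec = [x for y in vec for x in y]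
--   return vec
-- ===== SOURCE B (Python) =====
-- def dp_vocabize_2(item, vocab):
--     # Budget-driven recursion: emit the flat index vector directly, one marked
--     # sentence at a time, carrying a remaining-row budget; padding is a single
--     # [0]*(10*budget) at the end (no intermediate row lists, slice or flatten).
--     V = len(vocab)
--
--     def enc(t):
--         return vocab.index(t) if t in vocab else V
--
--     def sents(x, marker, k):
--         # encode sentences of one group while budget k lasts; return (flat, budget left)
--         if k == 0 or not x:
--             return [], k
--         rest, k2 = sents(x[1:], "SAME_S", k - 1)
--         return [enc(t) for t in x[0]] + [enc(marker)] + rest, k2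
--
--     def groups(gs, k):
--         if k == 0 or not gs:
--             return [0] * (10 * k)
--         flat, k2 = sents(gs[0], "NEW_S", k)
--         return flat + groups(gs[1:], k2)
--
--     return groups(item, 5)
-- ===== Notes on version B (the rewrite author's own statement) =====
-- stated objective: alternative
-- what changed: B replaces A's three staged passes (build all marked rows, map-encode a 5-slice, pad, flatten) by a mutual recursion over groups/sentences that carries a remaining-row budget of 5, emits the flat index vector directly and pads once with [0]*(10*budget); no intermediate flat_item, row list, slice or flatten exist.
import Mathlib
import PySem

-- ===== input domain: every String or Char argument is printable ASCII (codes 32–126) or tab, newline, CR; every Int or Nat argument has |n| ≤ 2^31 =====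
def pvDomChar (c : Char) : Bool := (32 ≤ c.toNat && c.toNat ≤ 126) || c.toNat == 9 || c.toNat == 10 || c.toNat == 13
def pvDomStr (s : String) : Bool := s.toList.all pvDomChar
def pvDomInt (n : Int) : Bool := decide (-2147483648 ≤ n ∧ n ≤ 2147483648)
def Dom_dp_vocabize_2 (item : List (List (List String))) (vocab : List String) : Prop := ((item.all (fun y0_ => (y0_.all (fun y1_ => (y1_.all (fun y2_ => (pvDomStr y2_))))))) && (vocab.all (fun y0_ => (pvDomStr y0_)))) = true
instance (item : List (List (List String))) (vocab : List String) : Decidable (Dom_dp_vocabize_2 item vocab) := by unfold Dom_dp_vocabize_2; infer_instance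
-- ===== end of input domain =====

-- B replaces A's staged passes (build all marked rows, encode a 5-slice, pad, flatten) by a
-- budget-carrying recursion that emits the flat vector directly (alternative decomposition).

-- ===== PORT A =====
def dp_vocabize_2 (item : List (List (List String))) (vocab : List String) : List Int :=
  let flat_item : List (List String) := item.foldl (fun fi x =>
    (x.foldl (fun (st : List (List String) × String) y =>
      (st.1 ++ [y ++ [st.2]], "SAME_S")) (fi, "NEW_S")).1) []
  let vec : List (List Int) := (PySem.List.slice flat_item none (some 5)).map (fun x =>
    x.map (fun y => if y ∈ vocab then (((PySem.List.index? vocab y).getD 0 : Nat) : Int)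
                    else (vocab.length : Int)))
  let vec := if vec.length < 5 then
      vec ++ List.replicate (5 - vec.length) (List.replicate 10 (0 : Int))
    else vec
  vec.flatten

-- ===== PORT B =====
-- Source B's enc: vocab.index(t) if t in vocab else len(vocab)
def pvEnc (vocab : List String) (t : String) : Int :=
  if t ∈ vocab then (((PySem.List.index? vocab t).getD 0 : Nat) : Int) else (vocab.length : Int)

-- Source B's sents: encode the sentences of one group while the budget lasts
def pvSents (vocab : List String) : List (List String) → String → Nat → List Int × Nat
  | _, _, 0 => ([], 0)
  | [], _, k => ([], k)
  | y :: ys, marker, Nat.succ k =>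
    let r := pvSents vocab ys "SAME_S" k
    (y.map (pvEnc vocab) ++ [pvEnc vocab marker] ++ r.1, r.2)

-- Source B's groups: process groups until the budget is spent, pad once at the end
def pvGroups (vocab : List String) : List (List (List String)) → Nat → List Int
  | _, 0 => []
  | [], k => List.replicate (10 * k) (0 : Int)
  | g :: gs, Nat.succ k =>
    let r := pvSents vocab g "NEW_S" (Nat.succ k)
    r.1 ++ pvGroups vocab gs r.2

def dp_vocabize_2_alt (item : List (List (List String))) (vocab : List String) : List Int :=
  pvGroups vocab item 5

-- ===== PRECONDITION & SPEC =====
def Spec_dp_vocabize_2 (item : List (List (List String))) (vocab : List String) (out : List Int) : Prop := out = dp_vocabize_2_alt item vocab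
instance (item : List (List (List String))) (vocab : List String) (out : List Int) : Decidable (Spec_dp_vocabize_2 item vocab out) := by unfold Spec_dp_vocabize_2; infer_instance

-- ===== CLAIM (what is proved, stated in full; the proofs are below) =====
def Claim_equal_dp_vocabize_2 : Prop := ∀ (item : List (List (List String))) (vocab : List String), Dom_dp_vocabize_2 item vocab → Spec_dp_vocabize_2 item vocab (dp_vocabize_2 item vocab)

-- ===== LEMMAS AND PROOFS =====

-- marked rows of one group, starting marker m
def pvMark (m : String) : List (List String) → List (List String)
  | [] => []
  | y :: ys => (y ++ [m]) :: pvMark "SAME_S" ys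

lemma pvMark_length (m : String) (x : List (List String)) : (pvMark m x).length = x.length := by
  induction x generalizing m with
  | nil => rfl
  | cons y ys ih => simp [pvMark, ih]

lemma innerA_eq (x : List (List String)) : ∀ (fi : List (List String)) (m : String),
    (x.foldl (fun (st : List (List String) × String) y =>
      (st.1 ++ [y ++ [st.2]], "SAME_S")) (fi, m)).1 = fi ++ pvMark m x := by
  induction x with
  | nil => intro fi m; simp [pvMark]
  | cons y ys ih => intro fi m; simp [List.foldl, pvMark, ih]

lemma flatA_eq (item : List (List (List String))) : ∀ (fi : List (List String)),
    item.foldl (fun fi x =>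
      (x.foldl (fun (st : List (List String) × String) y =>
        (st.1 ++ [y ++ [st.2]], "SAME_S")) (fi, "NEW_S")).1) fi
    = fi ++ (item.map (pvMark "NEW_S")).flatten := by
  induction item with
  | nil => intro fi; simp
  | cons x xs ih => intro fi; rw [List.foldl_cons, innerA_eq, ih]; simp

lemma sents_eq (vocab : List String) (x : List (List String)) : ∀ (m : String) (k : Nat),
    pvSents vocab x m k
    = ((((pvMark m x).take k).map (fun r => r.map (pvEnc vocab))).flatten, k - x.length) := by
  induction x with
  | nil =>
    intro m k
    cases k <;> simp [pvSents, pvMark]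
  | cons y ys ih =>
    intro m k
    cases k with
    | zero => simp [pvSents, pvMark]
    | succ k =>
      simp only [pvSents, ih "SAME_S" k, pvMark, List.take_succ_cons, List.map_cons,
        List.flatten_cons, List.length_cons, Nat.succ_sub_succ]
      simp

lemma groups_eq (vocab : List String) (gs : List (List (List String))) : ∀ (k : Nat),
    pvGroups vocab gs k
    = ((((gs.map (pvMark "NEW_S")).flatten.take k).map (fun r => r.map (pvEnc vocab))).flatten)
      ++ List.replicate (10 * (k - (gs.map (pvMark "NEW_S")).flatten.length)) (0 : Int) := by
  induction gs with
  | nil => intro k; cases k <;> simp [pvGroups]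
  | cons g gs ih =>
    intro k
    cases k with
    | zero => simp [pvGroups]
    | succ k =>
      simp only [pvGroups, sents_eq, List.map_cons, List.flatten_cons]
      rw [ih, List.take_append, pvMark_length]
      simp [Nat.sub_sub, List.length_append, pvMark_length]

lemma flatten_replicate_replicate (n : Nat) :
    (List.replicate n (List.replicate 10 (0 : Int))).flatten = List.replicate (10 * n) (0 : Int) := by
  induction n with
  | zero => simp
  | succ n ih =>
    rw [List.replicate_succ, List.flatten_cons, ih, Nat.mul_succ, Nat.add_comm,
      List.replicate_add]

-- ===== VERDICT (by name: the statement is the Claim_ definition above) =====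
theorem dp_vocabize_2_spec : Claim_equal_dp_vocabize_2 := by
  intro item vocab _
  unfold Spec_dp_vocabize_2 dp_vocabize_2 dp_vocabize_2_alt
  dsimp only
  rw [flatA_eq item [], List.nil_append, groups_eq]
  set R := (item.map (pvMark "NEW_S")).flatten with hR
  have hslice : PySem.List.slice R none (some 5) = R.take 5 := by
    have := PySem.List.slice_to_natCast R (5 : Nat)
    simpa using this
  rw [hslice]
  have hlen : ((R.take 5).map (fun x =>
      x.map (fun y => if y ∈ vocab then (((PySem.List.index? vocab y).getD 0 : Nat) : Int)
                    else (vocab.length : Int)))).length = min 5 R.length := by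
    simp
  by_cases h5 : R.length < 5
  · have hmin : min 5 R.length = R.length := by omega
    simp only [hlen, hmin, h5, if_pos]
    rw [List.flatten_append, flatten_replicate_replicate]
    rfl
  · have hmin : min 5 R.length = 5 := by omega
    have : 5 - R.length = 0 := by omega
    simp only [hlen, hmin, this, Nat.mul_zero, List.replicate_zero, List.append_nil]
    split_ifs with h
    · omega
    · rfl
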